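-- pv_equiv track=rewrite | github.com/3bl3gamer/chiastat | chia/types/gen/gen_chia_structs.py | make_type_serialize
-- ===== SOURCE A (Python) =====
-- def cap_first(string):
--     if len(string) == 0:
--         return string
--     return string[0].upper() + string[1:]
--
-- def is_class_type_name(name):
--     return isinstance(name, str) and name != 'List' and name != 'Optional' and name[0] == name[0].upper()
--
-- def type_option_is_ref(name):
--     return is_class_type_name(name) or (name != 'bytes' and name.startswith('bytes'))
--
-- def make_tuple_struct_name(tuple_ann_items):
--     return 'Tuple' + ''.join(''.join(cap_first(x) for x in dim) for dim in tuple_ann_items[1:])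
--
-- def make_type_name(ann_item):
--     if ann_item == 'str':
--         return 'string'
--     if isinstance(ann_item, tuple) and ann_item[0] == 'Tuple':
--         return make_tuple_struct_name(ann_item)
--     return ann_item
--
-- buf_func_names = {
--     'Bool',
--     'Uint8',
--     'Uint16',
--     'Uint32',
--     'Uint64',
--     'Uint128',
--     'Bytes32',
--     'Bytes100',
--     'Bytes',
--     'String'
-- }
--
-- def make_serialize_func_call(attr_name, ann_items):
--     base = ''.join([cap_first(make_type_name(x)) for x in ann_items])
--     if base in buf_func_names:
--         return f'utils.{base}ToBytes(buf, {attr_name})'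
--     return f'{attr_name}.ToBytes(buf)'
--
-- def make_none_option_check(attr_name, ann_items):
--     t = ann_items[1]
--     if t.startswith('uint'):
--         return f'{attr_name} == 0'
--     elif t == 'List':
--         return f'len({attr_name}) == 0'
--     elif type_option_is_ref(t):
--         return f'{attr_name} == nil'
--     else:
--         raise ValueError(f'serializing optional {t} is not supported ({attr_name})')
--
-- def make_type_serialize(name, ann_items):
--     res = ''
--     if len(ann_items) == 1:
--         res += make_serialize_func_call(name, ann_items) + '\n'
--     elif ann_items[0] == 'Optional':
--         opt_name = name.replace('.', '_') + '_isSet'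
--         deref = '*' if type_option_is_ref(ann_items[1]) and not is_class_type_name(ann_items[1]) else ''
--         res += f'{opt_name} := !({make_none_option_check(name, ann_items)})\n'
--         res += f'utils.BoolToBytes(buf, {opt_name})\n'
--         res += f'if {opt_name} {{\n'
--         res += make_type_serialize(deref+name, ann_items[1:])
--         res += '}\n'
--     elif ann_items[0] == 'List':
--         res += f'utils.Uint32ToBytes(buf, uint32(len({name})))\n'
--         res += f'for _, item := range {name} {{\n'
--         res += make_type_serialize('item', ann_items[1:])
--         res += '}\n'
--     return res
-- ===== SOURCE B (Python) =====
-- def cap_first(string):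
--     if len(string) == 0:
--         return string
--     return string[0].upper() + string[1:]
--
-- def is_class_type_name(name):
--     return isinstance(name, str) and name != 'List' and name != 'Optional' and name[0] == name[0].upper()
--
-- def type_option_is_ref(name):
--     return is_class_type_name(name) or (name != 'bytes' and name.startswith('bytes'))
--
-- def make_type_name(ann_item):
--     if ann_item == 'str':
--         return 'string'
--     return ann_item
--
-- buf_func_names = {
--     'Bool', 'Uint8', 'Uint16', 'Uint32', 'Uint64', 'Uint128',
--     'Bytes32', 'Bytes100', 'Bytes', 'String'
-- }
--
-- def make_serialize_func_call(attr_name, ann_items):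
--     base = ''.join([cap_first(make_type_name(x)) for x in ann_items])
--     if base in buf_func_names:
--         return f'utils.{base}ToBytes(buf, {attr_name})'
--     return f'{attr_name}.ToBytes(buf)'
--
-- def make_none_option_check(attr_name, ann_items):
--     t = ann_items[1]
--     if t.startswith('uint'):
--         return f'{attr_name} == 0'
--     elif t == 'List':
--         return f'len({attr_name}) == 0'
--     elif type_option_is_ref(t):
--         return f'{attr_name} == nil'
--     else:
--         raise ValueError(f'serializing optional {t} is not supported ({attr_name})')
--
-- def make_type_serialize(name, ann_items):
--     # Iterative: emitted prefix lines, a stack of '}\n' suffixes, a running name.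
--     prefixes = []
--     suffixes = []
--     items = ann_items
--     while len(items) > 1 and items[0] in ('Optional', 'List'):
--         if items[0] == 'Optional':
--             opt_name = name.replace('.', '_') + '_isSet'
--             deref = '*' if type_option_is_ref(items[1]) and not is_class_type_name(items[1]) else ''
--             prefixes.append(f'{opt_name} := !({make_none_option_check(name, items)})\n')
--             prefixes.append(f'utils.BoolToBytes(buf, {opt_name})\n')
--             prefixes.append(f'if {opt_name} {{\n')
--             name = deref + name
--         else:
--             prefixes.append(f'utils.Uint32ToBytes(buf, uint32(len({name})))\n')
--             prefixes.append(f'for _, item := range {name} {{\n')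
--             name = 'item'
--         suffixes.append('}\n')
--         items = items[1:]
--     middle = make_serialize_func_call(name, items) + '\n' if len(items) == 1 else ''
--     return ''.join(prefixes) + middle + ''.join(reversed(suffixes))
-- ===== Notes on version B (the rewrite author's own statement) =====
-- stated objective: alternative
-- what changed: Replaces A's self-recursion over the Optional/List wrapper chain with a single iterative loop that keeps a running name, a list of emitted prefix lines and a stack of '}\n' suffixes, then joins prefixes + middle + reversed suffixes.
import Mathlib
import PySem

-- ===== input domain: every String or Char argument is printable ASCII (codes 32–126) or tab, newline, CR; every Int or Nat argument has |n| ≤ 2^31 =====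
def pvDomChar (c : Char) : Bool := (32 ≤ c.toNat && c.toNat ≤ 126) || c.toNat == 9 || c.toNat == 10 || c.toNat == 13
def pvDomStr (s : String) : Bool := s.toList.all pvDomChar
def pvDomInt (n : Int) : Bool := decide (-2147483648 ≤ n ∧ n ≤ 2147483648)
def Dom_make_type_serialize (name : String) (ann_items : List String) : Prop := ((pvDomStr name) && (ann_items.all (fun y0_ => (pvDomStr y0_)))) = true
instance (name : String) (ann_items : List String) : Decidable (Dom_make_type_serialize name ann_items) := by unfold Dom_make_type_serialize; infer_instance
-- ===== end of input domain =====

-- B rebuilds A's recursive emitter as one iterative loop over the wrapper prefix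
-- (prefix lines + a "}\n" suffix stack); objective: alternative decomposition, same cost.

-- ===== PORT A =====
-- shared module helpers (identical in Source A and Source B)
def cap_first (s : String) : String :=
  match s.toList with
  | [] => s
  | c :: rest => String.ofList (PySem.Chars.upperChar c :: rest)  -- string[0].upper() + string[1:], exact on ASCII

def is_class_type_name (n : String) : Bool :=
  n ≠ "List" && n ≠ "Optional" &&
    (match n.toList with
     | [] => false   -- Python raises IndexError on "" here; unreachable under Pre_
     | c :: _ => c == PySem.Chars.upperChar c)  -- name[0] == name[0].upper(), exact on ASCII

def type_option_is_ref (n : String) : Bool :=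
  is_class_type_name n || (n ≠ "bytes" && PySem.Str.startswith n "bytes")

def make_type_name (x : String) : String := if x = "str" then "string" else x

def buf_func_names : List String :=
  ["Bool", "Uint8", "Uint16", "Uint32", "Uint64", "Uint128", "Bytes32", "Bytes100", "Bytes", "String"]

def make_serialize_func_call (attr_name : String) (ann_items : List String) : String :=
  let base := PySem.Str.join "" (ann_items.map (fun x => cap_first (make_type_name x)))
  if buf_func_names.contains base then "utils." ++ base ++ "ToBytes(buf, " ++ attr_name ++ ")"
  else attr_name ++ ".ToBytes(buf)"

def make_none_option_check (attr_name : String) (ann_items : List String) : String :=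
  let t := (ann_items.drop 1).headD ""
  if PySem.Str.startswith t "uint" then attr_name ++ " == 0"
  else if t = "List" then "len(" ++ attr_name ++ ") == 0"
  else if type_option_is_ref t then attr_name ++ " == nil"
  else ""   -- Python raises ValueError here; unreachable under Pre_

def make_type_serialize (name : String) (ann_items : List String) : String :=
  match ann_items with
  | [] => ""   -- Python raises IndexError (ann_items[0]); unreachable under Pre_
  | [x] => make_serialize_func_call name [x] ++ "\n"
  | a :: t :: rest =>
    if a = "Optional" then
      let opt_name := PySem.Str.replace name "." "_" ++ "_isSet"
      let deref := if type_option_is_ref t && !(is_class_type_name t) then "*" else ""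
      opt_name ++ " := !(" ++ make_none_option_check name (a :: t :: rest) ++ ")\n"
        ++ "utils.BoolToBytes(buf, " ++ opt_name ++ ")\n"
        ++ "if " ++ opt_name ++ " {\n"
        ++ make_type_serialize (deref ++ name) (t :: rest)
        ++ "}\n"
    else if a = "List" then
      "utils.Uint32ToBytes(buf, uint32(len(" ++ name ++ ")))\n"
        ++ "for _, item := range " ++ name ++ " {\n"
        ++ make_type_serialize "item" (t :: rest)
        ++ "}\n"
    else ""

-- ===== PORT B =====
-- the while loop of Source B: returns the final (name, items, prefixes, suffixes)
def mts_loop (name : String) (items prefixes suffixes : List String) :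
    String × List String × List String × List String :=
  match items with
  | a :: t :: rest =>
    if a = "Optional" then
      let opt_name := PySem.Str.replace name "." "_" ++ "_isSet"
      let deref := if type_option_is_ref t && !(is_class_type_name t) then "*" else ""
      mts_loop (deref ++ name) (t :: rest)
        (prefixes ++ [opt_name ++ " := !(" ++ make_none_option_check name (a :: t :: rest) ++ ")\n",
                      "utils.BoolToBytes(buf, " ++ opt_name ++ ")\n",
                      "if " ++ opt_name ++ " {\n"])
        (suffixes ++ ["}\n"])
    else if a = "List" then
      mts_loop "item" (t :: rest)
        (prefixes ++ ["utils.Uint32ToBytes(buf, uint32(len(" ++ name ++ ")))\n",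
                      "for _, item := range " ++ name ++ " {\n"])
        (suffixes ++ ["}\n"])
    else (name, a :: t :: rest, prefixes, suffixes)
  | _ => (name, items, prefixes, suffixes)

def make_type_serialize_alt (name : String) (ann_items : List String) : String :=
  let r := mts_loop name ann_items [] []
  let middle := if r.2.1.length = 1 then make_serialize_func_call r.1 r.2.1 ++ "\n" else ""
  PySem.Str.join "" r.2.2.1 ++ middle ++ PySem.Str.join "" r.2.2.2.reverse

-- ===== PRECONDITION & SPEC =====
-- serializable inner type for an Optional wrapper (otherwise Python raises)
def okOpt (t : String) : Prop :=
  t ≠ "" ∧ (PySem.Str.startswith t "uint" = true ∨ t = "List" ∨ type_option_is_ref t = true)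

-- Pre_ excludes exactly the inputs where Python A raises: the empty annotation list
-- (IndexError at ann_items[0]) and any reachable 'Optional' wrapper whose inner type
-- is "" (IndexError in is_class_type_name) or not uint/List/ref (ValueError).
def Pre_make_type_serialize (name : String) (ann_items : List String) : Prop :=
  ann_items ≠ [] ∧
  ∀ i < ann_items.length - 1,
    (∀ j < i, ann_items[j]! = "Optional" ∨ ann_items[j]! = "List") →
    ann_items[i]! = "Optional" → okOpt ann_items[i + 1]!

instance (name : String) (ann_items : List String) : Decidable (Pre_make_type_serialize name ann_items) := by
  unfold Pre_make_type_serialize okOpt; infer_instance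

def pvWitness_make_type_serialize : String × List String := ("foo.bar", ["Optional", "List", "uint32"])

def Spec_make_type_serialize (name : String) (ann_items : List String) (out : String) : Prop := out = make_type_serialize_alt name ann_items
instance (name : String) (ann_items : List String) (out : String) : Decidable (Spec_make_type_serialize name ann_items out) := by unfold Spec_make_type_serialize; infer_instance

-- ===== CLAIM (what is proved, stated in full; the proofs are below) =====
def Claim_equal_make_type_serialize : Prop := ∀ (name : String) (ann_items : List String), Dom_make_type_serialize name ann_items → Pre_make_type_serialize name ann_items → Spec_make_type_serialize name ann_items (make_type_serialize name ann_items)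

-- ===== LEMMAS AND PROOFS =====

-- sep-"" join over List Char is flatten (specific composition of PySem.Chars.join with the empty separator)
lemma join0 (L : List (List Char)) : List.intercalate [] L = L.flatten := by
  induction L with
  | nil => rfl
  | cons a L ih =>
    cases L with
    | nil => simp [List.intercalate]
    | cons b M =>
      simp only [List.intercalate] at *
      simp [List.intersperse] at *
      exact ih

lemma join_nil : PySem.Str.join "" [] = "" := rfl

lemma join_cons (s : String) (l : List String) :
    PySem.Str.join "" (s :: l) = s ++ PySem.Str.join "" l := by
  simp [PySem.Str.join, PySem.Chars.join, join0, String.ofList_append]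

lemma join_append (l1 l2 : List String) :
    PySem.Str.join "" (l1 ++ l2) = PySem.Str.join "" l1 ++ PySem.Str.join "" l2 := by
  induction l1 with
  | nil => simp [PySem.Str.join, PySem.Chars.join, join0]
  | cons a l ih => simp [join_cons, ih, String.append_assoc]

-- loop invariant: the assembled B output of a loop state equals pre ++ A's result ++ reversed suffixes
lemma mts_loop_inv (items : List String) : ∀ (name : String) (pre suf : List String),
    PySem.Str.join "" (mts_loop name items pre suf).2.2.1
      ++ (if (mts_loop name items pre suf).2.1.length = 1 then
            make_serialize_func_call (mts_loop name items pre suf).1 (mts_loop name items pre suf).2.1 ++ "\n"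
          else "")
      ++ PySem.Str.join "" (mts_loop name items pre suf).2.2.2.reverse
    = PySem.Str.join "" pre ++ make_type_serialize name items ++ PySem.Str.join "" suf.reverse
    := by
  induction items with
  | nil => simp [mts_loop, make_type_serialize]
  | cons a tl ih =>
    cases tl with
    | nil => intro name pre suf; simp [mts_loop, make_type_serialize, String.append_assoc]
    | cons t rest =>
      intro name pre suf
      by_cases hopt : a = "Optional"
      · subst hopt
        simp only [mts_loop, make_type_serialize, reduceIte]
        rw [ih]
        simp only [join_append, join_cons, join_nil, List.reverse_append, List.reverse_cons,
          List.reverse_nil, List.nil_append, List.cons_append]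
        simp only [← String.append_assoc]
        simp
      · by_cases hlist : a = "List"
        · subst hlist
          simp only [mts_loop, make_type_serialize, String.reduceEq, reduceIte]
          rw [ih]
          simp only [join_append, join_cons, join_nil, List.reverse_append, List.reverse_cons,
            List.reverse_nil, List.nil_append, List.cons_append]
          simp only [← String.append_assoc]
          simp
        · simp [mts_loop, make_type_serialize, hopt, hlist]


-- ===== VERDICT (by name: the statement is the Claim_ definition above) =====
theorem make_type_serialize_spec : Claim_equal_make_type_serialize := by
  intro name ann_items _ _
  unfold Spec_make_type_serialize make_type_serialize_alt
  have h := mts_loop_inv ann_items name [] []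
  simpa [join_nil] using h.symm
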